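-- pv_equiv track=rewrite | github.com/gcheng9430/InterviewPrep | Guo/3.py | largestCombo
-- ===== SOURCE A (Python) =====
-- import heapq
--
-- def largestCombo(popularity,k):
--     maxCombo = 0
--     for i in range(len(popularity)):
--         if popularity[i] > 0:
--             maxCombo+=popularity[i]
--         else:
--             popularity[i] = -popularity[i]
--
--     popularity.sort()
--
--     q = [(popularity[0],0)] #contains the min sum of subarray, the last index of the subarray
--     minSums = []
--     while q and len(minSums)<k-1:
--         sum, idx = heapq.heappop(q)
--         minSums.append(sum)
--         #extend the subarray
--         if idx<len(popularity)-1: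
--             heapq.heappush(q,(sum+popularity[idx+1],idx+1)) #include current one
--             heapq.heappush(q,(sum-popularity[idx]+popularity[idx+1],idx+1)) #don't include current one
--
--     res = [maxCombo]
--     for sum in minSums:
--         res.append(maxCombo-sum)
--     return res
-- ===== SOURCE B (Python) =====
-- def largestCombo(popularity, k):
--     # NOTE: like the original, this mutates `popularity` in place (abs + sort).
--     maxCombo = 0
--     for i in range(len(popularity)):
--         if popularity[i] > 0:
--             maxCombo += popularity[i]
--         else:
--             popularity[i] = -popularity[i]
--
--     popularity.sort()
--
--     cap = max(k, 1)
--     # iterative DP: keep the `cap` smallest subset sums (0 = empty subset),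
--     # merging two sorted lists at each element
--     sums = [0, popularity[0]]
--     for v in popularity[1:]:
--         shifted = [s + v for s in sums]
--         merged = []
--         i = j = 0
--         while len(merged) < cap and (i < len(sums) or j < len(shifted)):
--             if j >= len(shifted) or (i < len(sums) and sums[i] <= shifted[j]):
--                 merged.append(sums[i]); i += 1
--             else:
--                 merged.append(shifted[j]); j += 1
--         sums = merged
--     return [maxCombo - s for s in sums[:cap]]
-- ===== Notes on version B (the rewrite author's own statement) =====
-- stated objective: alternative
-- what changed: Replaces the heap-based best-first enumeration of subset sums with an iterative sorted-merge DP that keeps only the k smallest subset sums while scanning the sorted values once; Pre_ excludes only the empty list, on which both implementations raise IndexError.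
import Mathlib
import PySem

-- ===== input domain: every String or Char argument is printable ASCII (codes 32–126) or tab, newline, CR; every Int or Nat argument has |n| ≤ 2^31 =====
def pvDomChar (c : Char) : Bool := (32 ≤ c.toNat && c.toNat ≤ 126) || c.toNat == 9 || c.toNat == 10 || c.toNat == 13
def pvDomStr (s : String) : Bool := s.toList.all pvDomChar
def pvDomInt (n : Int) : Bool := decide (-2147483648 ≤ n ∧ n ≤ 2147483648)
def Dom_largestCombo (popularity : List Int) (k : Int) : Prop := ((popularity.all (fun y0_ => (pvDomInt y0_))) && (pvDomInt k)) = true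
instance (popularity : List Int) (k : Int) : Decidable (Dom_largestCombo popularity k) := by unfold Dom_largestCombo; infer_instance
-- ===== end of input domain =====

-- B replaces A's heap-based best-first enumeration of subset sums by an iterative sorted-merge DP
-- keeping the k smallest sums (objective: alternative algorithm, similar cost).
-- Both Pythons mutate `popularity` in place (abs + sort); the equivalence proved here is about the return value.

-- ===== PORT A =====
-- preprocessing loop (identical in both Pythons): maxCombo = sum of positives, list made nonnegative
def lcPreprocess (popularity : List Int) : Int × List Int :=
  popularity.foldl (fun acc x => if x > 0 then (acc.1 + x, acc.2 ++ [x]) else (acc.1, acc.2 ++ [-x])) (0, [])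

-- lexicographic ≤ on heap entries (sum, last index); heapq pops the lexicographically least tuple
def lcLexLe (a b : Int × Nat) : Bool := a.1 < b.1 || (a.1 == b.1 && a.2 ≤ b.2)

-- heappop: remove the (first occurrence of the) least entry; exact for heapq since equal tuples
-- are indistinguishable values
def lcPopMin : List (Int × Nat) → Option ((Int × Nat) × List (Int × Nat))
  | [] => none
  | a :: rest =>
    match lcPopMin rest with
    | none => some (a, [])
    | some (m, r) => if lcLexLe a m then some (a, rest) else some (m, a :: r)

-- the two guarded heappushes at the end of a loop iteration; indices are list positions
-- (Python ints that stay ≥ 0), kept as Nat; both accesses are guarded in range, so getD is exact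
def lcPush (p : List Int) (s : Int) (idx : Nat) (q' : List (Int × Nat)) : List (Int × Nat) :=
  if idx + 1 < p.length then
    (s + p.getD (idx + 1) 0, idx + 1) :: (s - p.getD idx 0 + p.getD (idx + 1) 0, idx + 1) :: q'
  else q'

-- the while loop of A
def lcHeapLoop (p : List Int) (k : Int) (q : List (Int × Nat)) (out : List Int) : List Int :=
  if h : (out.length : Int) < k - 1 then
    match lcPopMin q with
    | none => out
    | some ((s, idx), q') => lcHeapLoop p k (lcPush p s idx q') (out ++ [s])
  else out
termination_by ((k - 1) - out.length).toNat
decreasing_by simp only [List.length_append, List.length_cons, List.length_nil]; omega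

def largestCombo (popularity : List Int) (k : Int) : List Int :=
  let pre := lcPreprocess popularity
  let p := PySem.List.sorted pre.2 (fun x => x) false
  match p with
  | [] => []   -- Python raises IndexError here (popularity[0]); excluded by Pre_
  | p0 :: _ =>
    let minSums := lcHeapLoop p k [(p0, 0)] []
    minSums.foldl (fun res s => res ++ [pre.1 - s]) [pre.1]

-- ===== PORT B =====
-- the hand-written capped two-pointer merge of Source B (stops as soon as `cap` elements are emitted)
def lcMergeCap : Nat → List Int → List Int → List Int
  | 0, _, _ => []
  | _ + 1, [], [] => []
  | c + 1, [], y :: ys => y :: lcMergeCap c [] ys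
  | c + 1, x :: xs, [] => x :: lcMergeCap c xs []
  | c + 1, x :: xs, y :: ys =>
      if x ≤ y then x :: lcMergeCap c xs (y :: ys) else y :: lcMergeCap c (x :: xs) ys

def largestCombo_alt (popularity : List Int) (k : Int) : List Int :=
  let pre := lcPreprocess popularity
  let p := PySem.List.sorted pre.2 (fun x => x) false
  match p with
  | [] => []   -- same IndexError corner (sums = [0, popularity[0]]); excluded by Pre_
  | p0 :: t =>
    let cap := (max k 1).toNat                 -- cap = max(k, 1) ≥ 1
    let sums := t.foldl (fun sums v => lcMergeCap cap sums (sums.map (fun s => s + v))) [0, p0]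
    (sums.take cap).map (fun s => pre.1 - s)   -- sums[:cap] = take, exact since cap ≥ 1

-- ===== PRECONDITION & SPEC =====
-- Pre_ excludes only the empty list, on which BOTH implementations raise IndexError (popularity[0]).
def Pre_largestCombo (popularity : List Int) (k : Int) : Prop := popularity ≠ []
instance (popularity : List Int) (k : Int) : Decidable (Pre_largestCombo popularity k) := by
  unfold Pre_largestCombo; infer_instance

def pvWitness_largestCombo : List Int × Int := ([3, -1, 2], 3)

def Spec_largestCombo (popularity : List Int) (k : Int) (out : List Int) : Prop := out = largestCombo_alt popularity k
instance (popularity : List Int) (k : Int) (out : List Int) : Decidable (Spec_largestCombo popularity k out) := by unfold Spec_largestCombo; infer_instance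

-- ===== CLAIM (what is proved, stated in full; the proofs are below) =====
def Claim_equal_largestCombo : Prop := ∀ (popularity : List Int) (k : Int), Dom_largestCombo popularity k → Pre_largestCombo popularity k → Spec_largestCombo popularity k (largestCombo popularity k)

-- ===== LEMMAS AND PROOFS =====

-- ---------- the common specification: the multiset of nonempty-subset sums ----------

-- multiset of sums of NONEMPTY subsets of l
def lcNes : List Int → Multiset Int
  | [] => 0
  | v :: t => (v ::ₘ (lcNes t).map (fun x => v + x)) + lcNes t

-- one DP step on the multiset of all subset sums
def lcStepM (M : Multiset Int) (v : Int) : Multiset Int := M + M.map (fun x => v + x)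

theorem lcNes_singleton (a : Int) : lcNes [a] = {a} := by simp [lcNes]

theorem lcNes_nonneg (l : List Int) (h : ∀ y ∈ l, 0 ≤ y) : ∀ x ∈ lcNes l, 0 ≤ x := by
  induction l with
  | nil => simp [lcNes]
  | cons v t ih =>
    intro x hx
    have hv : 0 ≤ v := h v (by simp)
    have ht : ∀ y ∈ t, 0 ≤ y := fun y hy => h y (by simp [hy])
    simp only [lcNes, Multiset.mem_add, Multiset.mem_cons, Multiset.mem_map] at hx
    rcases hx with (rfl | ⟨a, ha, rfl⟩) | hx
    · exact hv
    · have := ih ht a ha; omega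
    · exact ih ht x hx

theorem lcNes_swap (a b : Int) (l : List Int) : lcNes (a :: b :: l) = lcNes (b :: a :: l) := by
  simp only [lcNes, Multiset.map_add, Multiset.map_cons, Multiset.map_map]
  have h1 : ((fun x => a + x) ∘ fun x => b + x) = ((fun x => b + x) ∘ fun x => a + x) := by
    funext x; simp [Function.comp]; ring
  rw [h1, add_comm a b]
  simp only [← Multiset.singleton_add]
  abel

theorem lcNes_perm {l1 l2 : List Int} (h : l1.Perm l2) : lcNes l1 = lcNes l2 := by
  induction h with
  | nil => rfl
  | cons x _ ih => simp [lcNes, ih]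
  | swap x y l => exact lcNes_swap y x l
  | trans _ _ ih1 ih2 => rw [ih1, ih2]

theorem lcStepM_nes (l : List Int) (v : Int) : lcStepM (0 ::ₘ lcNes l) v = 0 ::ₘ lcNes (v :: l) := by
  simp only [lcStepM, lcNes, Multiset.map_cons, add_zero]
  simp only [← Multiset.singleton_add]
  abel

theorem lcFoldl_stepM (t : List Int) : ∀ l : List Int,
    t.foldl lcStepM (0 ::ₘ lcNes l) = 0 ::ₘ lcNes (t.reverse ++ l) := by
  induction t with
  | nil => intro l; simp
  | cons v t ih =>
    intro l
    simp only [List.foldl_cons, lcStepM_nes, List.reverse_cons, List.append_assoc,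
      List.singleton_append]
    exact ih (v :: l)

-- ---------- B side: capped merge = truncated sort ----------

-- uncapped merge of two sorted lists (proof-side reference for lcMergeCap)
def lcMerge : List Int → List Int → List Int
  | [], ys => ys
  | x :: xs, [] => x :: lcMerge xs []
  | x :: xs, y :: ys =>
      if x ≤ y then x :: lcMerge xs (y :: ys) else y :: lcMerge (x :: xs) ys

theorem lcMerge_nil_right (xs : List Int) : lcMerge xs [] = xs := by
  induction xs with
  | nil => simp [lcMerge]
  | cons x xs ih => simp [lcMerge, ih]

theorem lcMerge_perm (xs ys : List Int) : (lcMerge xs ys).Perm (xs ++ ys) := by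
  fun_induction lcMerge with
  | case1 ys => simp
  | case2 x xs ih => simp [lcMerge_nil_right]
  | case3 x xs y ys h ih => exact ih.cons x
  | case4 x xs y ys h ih => exact (ih.cons y).trans (List.Perm.symm List.perm_middle)

theorem lcMerge_mem {z : Int} (xs ys : List Int) : z ∈ lcMerge xs ys ↔ z ∈ xs ∨ z ∈ ys := by
  rw [(lcMerge_perm xs ys).mem_iff]; simp

theorem lcMerge_sorted (xs ys : List Int) : xs.Pairwise (· ≤ ·) → ys.Pairwise (· ≤ ·) →
    (lcMerge xs ys).Pairwise (· ≤ ·) := by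
  fun_induction lcMerge xs ys with
  | case1 ys => intro _ hy; exact hy
  | case2 x xs ih => intro hx _; rw [lcMerge_nil_right]; exact hx
  | case3 x xs y ys h ih =>
      intro hx hy
      rw [List.pairwise_cons] at hx ⊢
      refine ⟨?_, ih hx.2 hy⟩
      intro z hz
      rcases (lcMerge_mem xs (y :: ys)).1 hz with hz | hz
      · exact hx.1 z hz
      · rcases List.mem_cons.1 hz with rfl | hz
        · exact h
        · exact h.trans ((List.pairwise_cons.1 hy).1 z hz)
  | case4 x xs y ys h ih =>
      intro hx hy
      rw [List.pairwise_cons] at hy ⊢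
      refine ⟨?_, ih hx hy.2⟩
      intro z hz
      rcases (lcMerge_mem (x :: xs) ys).1 hz with hz | hz
      · rcases List.mem_cons.1 hz with rfl | hz
        · omega
        · exact le_of_lt (lt_of_lt_of_le (by omega) ((List.pairwise_cons.1 hx).1 z hz))
      · exact hy.1 z hz

theorem lcMergeCap_eq_take : ∀ (c : Nat) (xs ys : List Int),
    lcMergeCap c xs ys = (lcMerge xs ys).take c := by
  intro c xs ys
  fun_induction lcMergeCap with
  | case1 xs ys => simp
  | case2 c => simp [lcMerge]
  | case3 c y ys ih => simp [lcMerge, ih]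
  | case4 c x xs ih => simp [lcMerge, ih]
  | case5 c x xs y ys h ih => simp [lcMerge, h, ih]
  | case6 c x xs y ys h ih => simp [lcMerge, h, ih]

-- truncating the inputs of a merge beyond the output cap does not change the capped output
theorem lcMerge_take_take : ∀ (c j m : Nat) (xs ys : List Int), c ≤ j → c ≤ m →
    (lcMerge (xs.take j) (ys.take m)).take c = (lcMerge xs ys).take c := by
  intro c
  induction c with
  | zero => simp
  | succ c ih =>
    intro j m xs ys hj hm
    match xs, ys with
    | [], ys =>
        simp only [List.take_nil, lcMerge]
        rw [List.take_take]
        congr 1; omega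
    | x :: xs, [] =>
        simp only [List.take_nil, lcMerge_nil_right]
        rw [List.take_take]
        congr 1; omega
    | x :: xs, y :: ys =>
        obtain ⟨j', rfl⟩ : ∃ j', j = j' + 1 := ⟨j - 1, by omega⟩
        obtain ⟨m', rfl⟩ : ∃ m', m = m' + 1 := ⟨m - 1, by omega⟩
        simp only [List.take_succ_cons, lcMerge]
        by_cases h : x ≤ y
        · rw [if_pos h, if_pos h]
          simp only [List.take_succ_cons]
          rw [show (y :: ys.take m') = (y :: ys).take (m' + 1) from rfl]
          rw [ih j' (m' + 1) xs (y :: ys) (by omega) (by omega)]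
        · rw [if_neg h, if_neg h]
          simp only [List.take_succ_cons]
          rw [show (x :: xs.take j') = (x :: xs).take (j' + 1) from rfl]
          rw [ih (j' + 1) m' (x :: xs) ys (by omega) (by omega)]

theorem lcSort_map_add (M : Multiset Int) (v : Int) :
    (M.map (fun x => v + x)).sort (· ≤ ·) = (M.sort (· ≤ ·)).map (fun x => v + x) := by
  refine (List.Perm.eq_of_pairwise (fun _ _ _ _ => le_antisymm) ?_ ?_ ?_)
  · exact Multiset.pairwise_sort _ _
  · exact List.Pairwise.map _ (fun h => by omega) (Multiset.pairwise_sort M _)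
  · rw [← Multiset.coe_eq_coe, Multiset.sort_eq, ← Multiset.map_coe, Multiset.sort_eq]

theorem lcMerge_sort_sort (A B : Multiset Int) :
    lcMerge (A.sort (· ≤ ·)) (B.sort (· ≤ ·)) = (A + B).sort (· ≤ ·) := by
  refine (List.Perm.eq_of_pairwise (fun _ _ _ _ => le_antisymm) ?_ ?_ ?_)
  · exact lcMerge_sorted _ _ (Multiset.pairwise_sort _ _) (Multiset.pairwise_sort _ _)
  · exact Multiset.pairwise_sort _ _
  · rw [← Multiset.coe_eq_coe, Multiset.sort_eq]
    have := lcMerge_perm (A.sort (· ≤ ·)) (B.sort (· ≤ ·))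
    rw [← Multiset.coe_eq_coe] at this
    rw [this, ← Multiset.coe_add, Multiset.sort_eq, Multiset.sort_eq]

theorem lcBloopStep (cap : Nat) (M : Multiset Int) (j : Nat) (v : Int) (hj : cap ≤ j) :
    lcMergeCap cap ((M.sort (· ≤ ·)).take j) (((M.sort (· ≤ ·)).take j).map (fun s => s + v))
      = ((lcStepM M v).sort (· ≤ ·)).take cap := by
  have hmap : ((M.sort (· ≤ ·)).take j).map (fun s => s + v)
      = ((M.map (fun x => v + x)).sort (· ≤ ·)).take j := by
    rw [lcSort_map_add, ← List.map_take]
    exact List.map_congr_left (fun x _ => by ring)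
  rw [hmap, lcMergeCap_eq_take, lcMerge_take_take cap j j _ _ hj hj, lcMerge_sort_sort]
  rfl

-- invariant of B's loop: `sums` is a (≥ cap)-truncation of the sorted multiset of subset sums so far
theorem lcBloop (cap : Nat) : ∀ (t : List Int) (M : Multiset Int) (sums : List Int) (j : Nat),
    cap ≤ j → sums = (M.sort (· ≤ ·)).take j →
    ∃ j', cap ≤ j' ∧
      t.foldl (fun sums v => lcMergeCap cap sums (sums.map (fun s => s + v))) sums
        = ((t.foldl lcStepM M).sort (· ≤ ·)).take j' := by
  intro t
  induction t with
  | nil => intro M sums j hj hs; exact ⟨j, hj, hs⟩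
  | cons v t ih =>
    intro M sums j hj hs
    subst hs
    simp only [List.foldl_cons]
    rw [lcBloopStep cap M j v hj]
    exact ih (lcStepM M v) _ cap le_rfl rfl

-- ---------- A side: the heap loop pops the smallest remaining subset sums in order ----------

-- sums of the enumeration subtree rooted at heap entry (s, idx)
def lcTm (p : List Int) (s : Int) (idx : Nat) : Multiset Int :=
  if _ : idx + 1 < p.length then
    {s} + lcTm p (s + p.getD (idx + 1) 0) (idx + 1)
        + lcTm p (s - p.getD idx 0 + p.getD (idx + 1) 0) (idx + 1)
  else {s}
termination_by p.length - idx

-- total sums still reachable from the heap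
def lcRq (p : List Int) (q : List (Int × Nat)) : Multiset Int := (q.map (fun e => lcTm p e.1 e.2)).sum

theorem lcTm_lb (p : List Int) (hs : p.Pairwise (· ≤ ·)) (hn : ∀ y ∈ p, 0 ≤ y) :
    ∀ (s : Int) (idx : Nat), ∀ x ∈ lcTm p s idx, s ≤ x := by
  intro s idx
  fun_induction lcTm p s idx with
  | case1 s idx h ih1 ih2 =>
    intro x hx
    have h1 : 0 ≤ p.getD (idx + 1) 0 := by
      rw [List.getD_eq_getElem _ _ h]
      exact hn _ (List.getElem_mem h)
    have h2 : p.getD idx 0 ≤ p.getD (idx + 1) 0 := by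
      have hidx : idx < p.length := by omega
      rw [List.getD_eq_getElem _ _ h, List.getD_eq_getElem _ _ hidx]
      exact List.pairwise_iff_getElem.mp hs idx (idx + 1) hidx h (by omega)
    simp only [Multiset.mem_add, Multiset.mem_singleton] at hx
    rcases hx with (rfl | hx) | hx
    · exact le_refl _
    · have := ih1 x hx; omega
    · have := ih2 x hx; omega
  | case2 s idx h =>
    intro x hx
    simp only [Multiset.mem_singleton] at hx
    omega

-- the subtree rooted at (s, idx) carries exactly the nonempty-subset sums of the tail, shifted
theorem lcTm_eq (p : List Int) : ∀ (s : Int) (idx : Nat), idx < p.length →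
    lcTm p s idx = (lcNes (p.drop idx)).map (fun x => s - p.getD idx 0 + x) := by
  intro s idx
  fun_induction lcTm p s idx with
  | case1 s idx h ih1 ih2 =>
    intro _
    have hidx : idx < p.length := by omega
    have hdrop : p.drop idx = p[idx] :: p.drop (idx + 1) := List.drop_eq_getElem_cons hidx
    rw [ih1 h, ih2 h, hdrop]
    simp only [lcNes, Multiset.map_add, Multiset.map_cons, Multiset.map_map,
      List.getD_eq_getElem _ _ h, List.getD_eq_getElem _ _ hidx]
    have e1 : s + p[idx + 1] - p[idx + 1] = s := by ring
    have e2 : s - p[idx] + p[idx + 1] - p[idx + 1] = s - p[idx] := by ring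
    rw [e1, e2]
    have c1 : ((fun x => s - p[idx] + x) ∘ (fun x => p[idx] + x)) = (fun x => s + x) := by
      funext x; simp [Function.comp]; ring
    simp only [c1]
    have : s - p[idx] + p[idx] = s := by ring
    rw [this]
    simp only [← Multiset.singleton_add]
  | case2 s idx h =>
    intro hidx
    have hdrop : p.drop idx = p[idx] :: p.drop (idx + 1) := List.drop_eq_getElem_cons hidx
    have hnil : p.drop (idx + 1) = [] := List.drop_eq_nil_of_le (by omega)
    rw [hdrop, hnil, lcNes_singleton, List.getD_eq_getElem _ _ hidx]
    simp

theorem lcPopMin_eq_none : ∀ (q : List (Int × Nat)), lcPopMin q = none ↔ q = [] := by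
  intro q
  cases q with
  | nil => simp [lcPopMin]
  | cons a rest =>
    simp only [lcPopMin]
    cases h : lcPopMin rest with
    | none => simp
    | some er => cases er with | mk m r => by_cases hle : lcLexLe a m <;> simp [hle]

theorem lcPopMin_perm : ∀ (q : List (Int × Nat)) (e : Int × Nat) (r : List (Int × Nat)),
    lcPopMin q = some (e, r) → q.Perm (e :: r) := by
  intro q
  induction q with
  | nil => intro e r h; simp [lcPopMin] at h
  | cons a rest ih =>
    intro e r h
    simp only [lcPopMin] at h
    cases hrec : lcPopMin rest with
    | none =>
      rw [hrec] at h
      have : rest = [] := (lcPopMin_eq_none rest).mp hrec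
      subst this
      simp at h
      simp [h.1, h.2]
    | some er =>
      obtain ⟨m, r'⟩ := er
      rw [hrec] at h
      by_cases hle : lcLexLe a m
      · simp [hle] at h
        rw [← h.1, ← h.2]
      · simp [hle] at h
        obtain ⟨rfl, rfl⟩ := h
        exact (List.Perm.cons a (ih m r' hrec)).trans (List.Perm.swap m a r')

theorem lcPopMin_min : ∀ (q : List (Int × Nat)) (e : Int × Nat) (r : List (Int × Nat)),
    lcPopMin q = some (e, r) → ∀ x ∈ q, e.1 ≤ x.1 := by
  intro q
  induction q with
  | nil => intro e r h; simp [lcPopMin] at h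
  | cons a rest ih =>
    intro e r h x hx
    simp only [lcPopMin] at h
    cases hrec : lcPopMin rest with
    | none =>
      rw [hrec] at h
      have : rest = [] := (lcPopMin_eq_none rest).mp hrec
      subst this
      simp at h hx
      subst hx; rw [← h.1]
    | some er =>
      obtain ⟨m, r'⟩ := er
      rw [hrec] at h
      have hmin := ih m r' hrec
      by_cases hle : lcLexLe a m
      · simp [hle] at h
        obtain ⟨rfl, rfl⟩ := h
        have ham : a.1 ≤ m.1 := by
          simp only [lcLexLe, Bool.or_eq_true, decide_eq_true_eq, Bool.and_eq_true, beq_iff_eq] at hle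
          omega
        rcases List.mem_cons.1 hx with rfl | hx
        · exact le_refl _
        · exact ham.trans (hmin x hx)
      · simp [hle] at h
        obtain ⟨rfl, rfl⟩ := h
        have hma : m.1 ≤ a.1 := by
          simp only [lcLexLe, Bool.or_eq_true, decide_eq_true_eq, Bool.and_eq_true, beq_iff_eq] at hle
          omega
        rcases List.mem_cons.1 hx with rfl | hx
        · exact hma
        · exact hmin x hx

theorem lcRq_mem (p : List Int) (q : List (Int × Nat)) (x : Int) :
    x ∈ lcRq p q ↔ ∃ e ∈ q, x ∈ lcTm p e.1 e.2 := by
  induction q with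
  | nil => simp [lcRq]
  | cons a rest ih =>
    simp only [lcRq, List.map_cons, List.sum_cons, Multiset.mem_add] at *
    constructor
    · rintro (hx | hx)
      · exact ⟨a, by simp, hx⟩
      · obtain ⟨e, he, hx⟩ := ih.1 hx
        exact ⟨e, by simp [he], hx⟩
    · rintro ⟨e, he, hx⟩
      rcases List.mem_cons.1 he with rfl | he
      · exact Or.inl hx
      · exact Or.inr (ih.2 ⟨e, he, hx⟩)

theorem lcRq_perm (p : List Int) {q1 q2 : List (Int × Nat)} (h : q1.Perm q2) :
    lcRq p q1 = lcRq p q2 := List.Perm.sum_eq (h.map _)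

-- invariant of A's loop: the output collects, in order, the smallest reachable sums
theorem lcHeapLoop_spec (p : List Int) (k : Int) (hs : p.Pairwise (· ≤ ·)) (hn : ∀ y ∈ p, 0 ≤ y)
    (q : List (Int × Nat)) (out : List Int) :
    (∀ o ∈ out, ∀ e ∈ q, o ≤ e.1) → out.Pairwise (· ≤ ·) →
    lcHeapLoop p k q out = out ++ ((lcRq p q).sort (· ≤ ·)).take ((k - 1 - out.length).toNat) := by
  fun_induction lcHeapLoop p k q out with
  | case1 q out h hpop =>
    intro _ _
    have : q = [] := (lcPopMin_eq_none q).mp hpop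
    subst this
    simp [lcRq]
  | case2 q out h s idx q' hpop ih =>
    intro hbound hsort
    have hperm := lcPopMin_perm q (s, idx) q' hpop
    have hmin := lcPopMin_min q (s, idx) q' hpop
    have hsq : (s, idx) ∈ q := hperm.mem_iff.mpr (by simp)
    set q2 := lcPush p s idx q' with hq2
    -- every sum reachable from the new queue is ≥ s
    have hq2lb : ∀ e ∈ q2, s ≤ e.1 := by
      intro e he
      rw [hq2, lcPush] at he
      split at he
      · rename_i hlt
        have h1 : 0 ≤ p.getD (idx + 1) 0 := by
          rw [List.getD_eq_getElem _ _ hlt]; exact hn _ (List.getElem_mem hlt)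
        have h2 : p.getD idx 0 ≤ p.getD (idx + 1) 0 := by
          have hidx : idx < p.length := by omega
          rw [List.getD_eq_getElem _ _ hlt, List.getD_eq_getElem _ _ hidx]
          exact List.pairwise_iff_getElem.mp hs idx (idx + 1) hidx hlt (by omega)
        rcases List.mem_cons.1 he with rfl | he
        · dsimp only; omega
        · rcases List.mem_cons.1 he with rfl | he
          · dsimp only; omega
          · exact hmin e (hperm.mem_iff.mpr (by simp [he]))
      · exact hmin e (hperm.mem_iff.mpr (by simp [he]))
    -- multiset bookkeeping: popping (s, idx) removes exactly one copy of s
    have hRq : lcRq p q = s ::ₘ lcRq p q2 := by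
      rw [lcRq_perm p hperm]
      rw [hq2, lcPush]
      split
      · rename_i hlt
        simp only [lcRq, List.map_cons, List.sum_cons]
        rw [lcTm, dif_pos hlt]
        simp only [← Multiset.singleton_add]
        abel
      · rename_i hlt
        simp only [lcRq, List.map_cons, List.sum_cons]
        rw [lcTm, dif_neg hlt]
        simp [← Multiset.singleton_add]
    -- the popped sum is the least remaining sum
    have hsort_cons : (lcRq p q).sort (· ≤ ·) = s :: (lcRq p q2).sort (· ≤ ·) := by
      rw [hRq]
      refine Multiset.sort_cons s _ _ ?_
      intro b hb
      rcases (lcRq_mem p q2 b).1 hb with ⟨e, he, hbe⟩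
      exact (hq2lb e he).trans (lcTm_lb p hs hn e.1 e.2 b hbe)
    have hbound2 : ∀ o ∈ out ++ [s], ∀ e ∈ q2, o ≤ e.1 := by
      intro o ho e he
      rcases List.mem_append.1 ho with ho | ho
      · exact (hbound o ho (s, idx) hsq).trans (hq2lb e he)
      · simp at ho; subst ho; exact hq2lb e he
    have hsort2 : (out ++ [s]).Pairwise (· ≤ ·) := by
      rw [List.pairwise_append]
      refine ⟨hsort, by simp, ?_⟩
      intro o ho y hy
      simp only [List.mem_singleton] at hy
      rw [hy]
      exact hbound o ho (s, idx) hsq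
    rw [ih hbound2 hsort2, hsort_cons]
    have hlen : (k - 1 - (out.length : Int)).toNat = (k - 1 - ((out ++ [s]).length : Int)).toNat + 1 := by
      simp only [List.length_append, List.length_cons, List.length_nil]
      omega
    rw [hlen, List.take_succ_cons]
    simp
  | case3 q out h =>
    intro _ _
    have : (k - 1 - (out.length : Int)).toNat = 0 := by omega
    simp [this]

-- ---------- preprocessing facts ----------

theorem lcPreprocess_snd_aux (l : List Int) : ∀ (a : Int) (acc : List Int),
    (l.foldl (fun acc x => if x > 0 then (acc.1 + x, acc.2 ++ [x]) else (acc.1, acc.2 ++ [-x]))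
      (a, acc)).2 = acc ++ l.map (fun x => if x > 0 then x else -x) := by
  induction l with
  | nil => intro a acc; simp
  | cons v t ih =>
    intro a acc
    by_cases hv : v > 0
    · simp only [List.foldl_cons, if_pos hv, List.map_cons, ih]
      simp
    · simp only [List.foldl_cons, if_neg hv, List.map_cons, ih]
      simp

theorem lcPreprocess_snd (l : List Int) :
    (lcPreprocess l).2 = l.map (fun x => if x > 0 then x else -x) := by
  rw [lcPreprocess, lcPreprocess_snd_aux]
  simp

-- ---------- the main equivalence ----------

theorem lcMain (popularity : List Int) (k : Int) (hne : popularity ≠ []) :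
    largestCombo popularity k = largestCombo_alt popularity k := by
  set maxC := (lcPreprocess popularity).1 with hmaxC
  set p := PySem.List.sorted (lcPreprocess popularity).2 (fun x => x) false with hpdef
  have hp_ne : p ≠ [] := by
    rw [hpdef, Ne, PySem.List.sorted_eq_nil_iff, lcPreprocess_snd]
    simp [hne]
  obtain ⟨p0, t, hp⟩ : ∃ p0 t, p = p0 :: t := by
    cases hcase : p with
    | nil => exact absurd hcase hp_ne
    | cons a b => exact ⟨a, b, rfl⟩
  have hp_pair : p.Pairwise (· ≤ ·) := by
    have := PySem.List.sorted_pairwise (lcPreprocess popularity).2 (fun x => x)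
    simpa [hpdef] using this
  have hp_nonneg : ∀ y ∈ p, 0 ≤ y := by
    intro y hy
    rw [hpdef, PySem.List.mem_sorted, lcPreprocess_snd, List.mem_map] at hy
    obtain ⟨x, _, rfl⟩ := hy
    split <;> omega
  have h00 : 0 ≤ p0 := hp_nonneg p0 (by simp [hp])
  -- evaluate port A
  have hA : largestCombo popularity k
      = maxC :: (lcHeapLoop p k [(p0, 0)] []).map (fun s => maxC - s) := by
    rw [largestCombo, ← hmaxC, ← hpdef, hp]
    dsimp only
    rw [PySem.List.foldl_append_singleton_eq_map]
    simp
  -- evaluate port B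
  have hB : largestCombo_alt popularity k
      = ((((List.foldl (fun sums v => lcMergeCap ((max k 1).toNat) sums
            (sums.map (fun s => s + v))) [0, p0] t)).take ((max k 1).toNat)).map (fun s => maxC - s)) := by
    rw [largestCombo_alt, ← hmaxC, ← hpdef, hp]
  -- B's loop result: a truncation of the sorted multiset of all subset sums of p
  set cap : Nat := (max k 1).toNat with hcap
  have hseed : ([0, p0] : List Int) = ((0 ::ₘ lcNes [p0]).sort (· ≤ ·)).take (max cap 2) := by
    rw [lcNes_singleton, Multiset.sort_cons 0 {p0} _ (by intro b hb; simp at hb; omega)]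
    rw [Multiset.sort_singleton]
    rw [List.take_of_length_le (by simp)]
  obtain ⟨j', hj', hBloop⟩ := lcBloop cap t (0 ::ₘ lcNes [p0]) [0, p0] (max cap 2)
    (le_max_left _ _) hseed
  rw [lcFoldl_stepM t [p0]] at hBloop
  have hpermp : (t.reverse ++ [p0]).Perm p := by
    rw [hp]
    exact (List.perm_append_singleton p0 t.reverse).trans ((List.reverse_perm t).cons p0)
  rw [lcNes_perm hpermp] at hBloop
  -- A's loop result: the first (k-1) of the sorted multiset of nonempty-subset sums of p
  have hAloop : lcHeapLoop p k [(p0, 0)] []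
      = ((lcNes p).sort (· ≤ ·)).take ((k - 1).toNat) := by
    have := lcHeapLoop_spec p k hp_pair hp_nonneg [(p0, 0)] [] (by simp) (by simp)
    rw [this]
    have hRq1 : lcRq p [(p0, 0)] = lcNes p := by
      have h0len : 0 < p.length := by rw [hp]; simp
      simp only [lcRq, List.map_cons, List.map_nil, List.sum_cons, List.sum_nil, add_zero]
      rw [lcTm_eq p p0 0 h0len]
      have : p.getD 0 0 = p0 := by rw [hp]; rfl
      rw [this, List.drop_zero]
      have : (lcNes p).map (fun x => p0 - p0 + x) = (lcNes p).map (fun x => x) :=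
        Multiset.map_congr rfl (fun x _ => by ring)
      rw [this, Multiset.map_id']
    rw [hRq1]
    simp
  -- assemble both sides
  rw [hA, hB, hAloop, hBloop, List.take_take]
  have hmin : min cap j' = cap := min_eq_left hj'
  rw [hmin]
  have hsort0 : (0 ::ₘ lcNes p).sort (· ≤ ·) = 0 :: (lcNes p).sort (· ≤ ·) :=
    Multiset.sort_cons 0 _ _ (lcNes_nonneg p hp_nonneg)
  rw [hsort0]
  have hcap1 : cap = (k - 1).toNat + 1 := by rw [hcap]; omega
  rw [hcap1, List.take_succ_cons]
  simp

-- ===== VERDICT (by name: the statement is the Claim_ definition above) =====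
theorem largestCombo_spec : Claim_equal_largestCombo := by
  unfold Claim_equal_largestCombo
  intro popularity k _ hpre
  unfold Spec_largestCombo
  exact lcMain popularity k hpre
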